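/- GENERATED by mk_final_copies.py from the proof of the farm's unit `decode_residue.10` (farm:decode_residue.10.1: Proof.lean) as the
   re-elaboration sweep compiled it — do not edit. -/
import Asan.CheckWalk
import Vorbis.Spec.Units.decode_residue_10
import Vorbis.Spec.Worked.decode_residue_10_Lemmas
open X86 X86.User Asan Vorbis Vorbis.Spec Vorbis.Spec.DecodeResidue

set_option maxRecDepth 4000
set_option maxHeartbeats 16000000

namespace Vorbis.Spec.decode_residue_10


/-- `movzx r12d, r12b` of a byte loaded from memory. -/
theorem zx8 (cv : Nat) (h : cv < 256) :
    Word.ofBV (BitVec.setWidth 64 (BitVec.zeroExtend 32 (BitVec.setWidth 8 (BitVec.zeroExtend 32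
      (BitVec.ofNat 8 cv))))) = UInt64.ofNat cv := by
  apply UInt64.toNat_inj.mp
  unfold Word.ofBV
  simp only [UInt64.toNat_ofBitVec, BitVec.toNat_setWidth, BitVec.toNat_ofNat, UInt64.toNat_ofNat', BitVec.zeroExtend]
  omega

/-- `movsx rsi, r12w` of a non-negative 16-bit value. -/
theorem sx16 (bv : Nat) (h : bv < 2 ^ 15) :
    Word.ofBV (BitVec.signExtend 64 (BitVec.setWidth 16 (BitVec.zeroExtend 32 (BitVec.ofNat 16 bv)))) =
      UInt64.ofNat bv := by
  apply UInt64.toNat_inj.mp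
  unfold Word.ofBV
  have e : (BitVec.setWidth 16 (BitVec.zeroExtend 32 (BitVec.ofNat 16 bv))).toNat = bv := by
    simp only [BitVec.toNat_setWidth, BitVec.toNat_ofNat, BitVec.zeroExtend]
    omega
  have hm : (BitVec.setWidth 16 (BitVec.zeroExtend 32 (BitVec.ofNat 16 bv))).msb = false := by
    rw [BitVec.msb_eq_decide, e]
    simp only [decide_eq_false_iff_not]
    omega
  rw [BitVec.signExtend_eq_setWidth_of_msb_false hm]
  simp only [UInt64.toNat_ofBitVec, BitVec.toNat_setWidth, e, UInt64.toNat_ofNat']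
  omega

/-- `test r12w, 0x8000` gave zero: bit 15 of the 16-bit value is clear. -/
theorem bit15_bv (x : BitVec 16) (h : BitVec.setWidth 16 (BitVec.zeroExtend 32 x) &&& 32768#16 = 0#16) :
    x < 32768#16 := by
  bv_decide

/-- The same about the number. -/
theorem bit15 (bv : Nat) (hlt : bv < 65536)
    (h : (BitVec.setWidth 16 (BitVec.zeroExtend 32 (BitVec.ofNat 16 bv)) &&& 32768#16).toNat = 0) : bv < 32768 := by
  have h0 : BitVec.setWidth 16 (BitVec.zeroExtend 32 (BitVec.ofNat 16 bv)) &&& 32768#16 = 0#16 :=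
    BitVec.eq_of_toNat_eq h
  have h1 := bit15_bv _ h0
  have h2 : (BitVec.ofNat 16 bv).toNat < (32768#16).toNat := h1
  simp only [BitVec.toNat_ofNat] at h2
  omega

/-- A small number through a 32-bit register. -/
theorem ofBV32_small (n : Nat) (h : n < 2 ^ 32) : Word.ofBV (BitVec.ofNat 32 n) = UInt64.ofNat n := by
  apply UInt64.toNat_inj.mp
  rw [Vorbis.toNat_ofBV32, Vorbis.Spec.toNat_ofNat32 n h, UInt64.toNat_ofNat']
  omega

/-- `offset = begin + pcount * part_size` computed in 32 bits (`imul eax, r14d ; add r13d, eax`) is exact. -/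
theorem off32 (bg pc ps : Nat) (h : bg + pc * ps < 2 ^ 32) :
    argU32 (Word.ofBV (BitVec.ofNat 32 bg + BitVec.ofNat 32 pc * BitVec.ofNat 32 ps)) = bg + pc * ps := by
  unfold argU32
  rw [Vorbis.toNat_ofBV32, BitVec.toNat_add, BitVec.toNat_mul]
  simp only [BitVec.toNat_ofNat]
  rw [← Nat.mul_mod, Nat.add_mod_mod, Nat.mod_add_mod, Nat.mod_mod, Nat.mod_eq_of_lt h]

/-- The residue book's address `codebooks + 2120·b` as the machine computes it (`imul rsi,rsi,0x848 ; add rsi,[rdi+0xa8]`). -/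
theorem rsi_toNat (bv cbs : Nat) (h : cbs + 2120 * bv < 0xC00000) :
    (UInt64.ofNat bv * 2120 + UInt64.ofNat cbs).toNat = cbs + 2120 * bv := by
  u_omega

/-- A number below 2^64 as a word. -/
theorem toNat_small (n : Nat) (h : n < 2 ^ 64) : (UInt64.ofNat n).toNat = n := by
  rw [UInt64.toNat_ofNat']
  exact Nat.mod_eq_of_lt h

/-- A small number passed in a 32-bit register. -/
theorem argU32_small (n : Nat) (h : n < 2 ^ 32) : argU32 (Word.ofBV (BitVec.ofNat 32 n)) = n := by
  unfold argU32
  rw [Vorbis.toNat_ofBV32, Vorbis.Spec.toNat_ofNat32 n h]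
  exact Nat.mod_eq_of_lt h

/-- **The body of the j-loop 2279** (0x10f914 … 0x10fa4c, one turn): from the loop head's assertion `At30` to the latch of the
i-loop (`At34`: `j ≥ ch`), to `done:` (`At32`: residue_decode returned 0), or to the loop head again with `j + 1` (the channel is
not decoded, `b < 0`, or residue_decode returned non-zero). Four walks in sequence: each part's facts need the branch
conditions of the part before. -/
theorem loop_body {Lay : Layout} (hLay : Lay.hi = 0x1000000) {μ : Microarch} (hμ : UserX.MicroOK μ) {u₀ : State}
    (hcode : HasCodeNat Lay u₀ Vorbis.L.decode_residue.entry Vorbis.Code.code_decode_residue.nat Vorbis.L.decode_residue.size)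
    (h1 : Asan.SmallCheck Lay μ Vorbis.WayInv (Vorbis.CodeOK u₀) [.rax, .rdx] 1 Vorbis.L.__asan_load1_noabort.entry)
    (h8 : Asan.SmallCheck Lay μ Vorbis.WayInv (Vorbis.CodeOK u₀) [.rax, .rcx, .rdx] 8 Vorbis.L.__asan_load8_noabort.entry)
    (h2 : Asan.SmallCheck Lay μ Vorbis.WayInv (Vorbis.CodeOK u₀) [.rax, .rcx, .rdx] 2 Vorbis.L.__asan_load2_noabort.entry)
    (h4 : Asan.SmallCheck Lay μ Vorbis.WayInv (Vorbis.CodeOK u₀) [.rax, .rcx, .rdx] 4 Vorbis.L.__asan_load4_noabort.entry)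
    (hrd : ∀ (others : List Obj) (frames : List (Nat × FrameLayout)) (Blk : Block → Prop) (len : Nat), Calls Lay μ Vorbis.WayInv (Vorbis.conv u₀) Vorbis.L.residue_decode.entry (Vorbis.Spec.residue_decode.spec others frames Blk len))
    (g : G) (hent : Entered u₀ g) (pass cs i pcount : Nat) (v : State) (hat : At30 u₀ g pass cs i pcount v) :
    ReachVia Lay μ WayInv v (fun v' => (At34 u₀ g pass cs i pcount v' ∨ At32 u₀ g v') ∨
      (At30 u₀ g pass cs i pcount v' ∧ g.ch - (v'.reg .rbx).toNat < g.ch - (v.reg .rbx).toNat)) := by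
  have he := hent.entry
  v_entry he
  obtain ⟨hrip, c, hloop, j, hj, hrbx⟩ := hat
  have hrd' := hrd g.others' g.frames' g.Blk g.len
  have r_rsp := c.rsp
  have r_rbp := c.rbp
  have r_r15 := hloop.r15
  have w_eq : Mem.EqOn Vorbis.L.textLo Vorbis.L.textHi u₀.mem v.mem := c.code
  have hdf : v.flags .df = false := (show abiInv _ from c.inv).1
  have hmx : v.mxcsr &&& 0x1F80 = 0x1F80 := (show abiInv _ from c.inv).2
  have hsse := Vorbis.sseOK_of_abiInv c.inv
  have l_ch := c.fr_ch
  have l_dnd := hloop.path.sl_dnd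
  have l_pcd := c.fr_pcd
  have l_cs := hloop.path.sl_cs
  have l_i := hloop.sl_i
  have l_pass := hloop.sl_pass
  have l_rb := c.fr_rb
  have l_pcount := hloop.sl_pcount
  have l_f := c.fr_f
  have l_rtype := c.fr_rtype
  have l_tap := hloop.path.sl_tap
  have hargs := hent.args
  have hC16 : g.C ≤ 16 := by
    have h := hent.vorbis.config.header.HD1.2
    unfold G.C
    rw [nchan_def]
    omega
  have hchC : g.ch ≤ g.C := hargs.ch_le
  have hsj := sx_reg j (by omega)
  have hroom := hent.room
  have eRA : (g.e.reg .rsp).toNat = g.RA := rfl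
  have er9 : (g.e.reg .r9).toNat = g.dnd := rfl
  have ersi : (g.e.reg .rsi).toNat = g.rb := rfl
  have erdi : (g.e.reg .rdi).toNat = g.f := rfl
  have hsh := c.shadow
  -- 0x10f914 – 0x10f91c: `j < ch`?
  u_walk hcode [hμ.vendor, hsj] until [Vorbis.L.decode_residue.cut34, 0x10f922] span [Vorbis.L.textLo, Vorbis.L.textHi] side (v_side)
  · -- 0x10fa8d: j ≥ ch, the latch of the i-loop
    refine ReachVia.done (Or.inl (Or.inl ⟨w_rip, ?_, ?_⟩))
    · refine common_same_mem c w_mem (w_kept .rbp rfl) (w_kept .rsp rfl) ?_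
      v_inv
    · exact innerB_same_mem hloop w_mem (w_kept .r15 rfl)
  · -- 0x10f922: j < ch; `do_not_decode[j]`
    have hjc : j < g.ch := lt_of_not_jge g.ch j (by omega) hj hbr_10f91c
    have hdndst := hargs.dnd_stack
    have site1 : Site g.Live' (g.dnd + j) 1 :=
      ((LiveBytes.of_liveIn hargs.dnd_live).site (g.dnd + j) 1 (by omega) (by omega) (by omega)).mono g.live_mono
    u_walk hcode [hμ.vendor, hsj] until [Vorbis.L.decode_residue.cut30, 0x10f93f] span [Vorbis.L.textLo, Vorbis.L.textHi] side (v_side)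
    case check_10f933 =>
      have hun : ShadowUntouched v.mem s_10f933.mem := by v_untouched
      exact Vorbis.Spec.check_site hsh hun site1 (by u_omega)
    · -- the latch: do_not_decode[j] ≠ 0
      have hs0 : Mem.SameExcept [⟨g.RA - 848, g.RA - 248⟩, ⟨g.RA - 224, g.RA - 216⟩] v.mem s_10f911.mem := by
        u_same
      obtain ⟨hs, hbits, hmu, _⟩ := stack_only hent c hs0 (stb_vorbis.channel_buffers g.e.mem g.f 0) 0
      have hun : ShadowUntouched v.mem s_10f911.mem := by v_untouched
      refine ReachVia.done (Or.inr ?_)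
      refine latch_exit hent c hloop hjc hs (win0 hent) hun hbits hmu w_rip ?_ w_rsp ?_ w_eq ?_ w_rbx
      · rw [w_kept .rbp rfl]
        exact r_rbp
      · rw [w_kept .r15 rfl]
        exact r_r15
      · v_inv
    · -- 0x10f93f: the channel is decoded
      have hnd : v.mem.u8 (g.dnd + j) = 0 := by
        have e : g.e.reg Reg.r9 + UInt64.ofNat j = addr (g.dnd + j) := eq_addr _ _ (by u_omega)
        rw [e] at hbr_10f93d
        have hlt := X86.User.Mem.u8_lt v.mem (g.dnd + j)
        have e2 : v.mem.readLE (addr (g.dnd + j)) 1 = v.mem.u8 (g.dnd + j) := rfl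
        rw [e2] at hbr_10f93d
        omega
      obtain ⟨_, hcsP, hPRD, hWlt, _, site2, site3, site4, site5, site6, site7, site8, site9, site10, hrowv, hcl, hr_off,
        hf_off⟩ := prelude hent c hloop hjc hnd
      obtain ⟨rowj, hrowj⟩ : ∃ x, rowBase g.TB g.C g.PRD j = x := ⟨_, rfl⟩
      obtain ⟨rp, hrp⟩ : ∃ rp, v.mem.ptr (slot g.TB g.C g.PRD j cs) = rp := ⟨_, rfl⟩
      obtain ⟨cv, hcv⟩ : ∃ cv, v.mem.u8 (rp + i) = cv := ⟨_, rfl⟩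
      obtain ⟨rbk, hrbk⟩ : ∃ x, Residue.residue_books v.mem g.r = x := ⟨_, rfl⟩
      obtain ⟨bv, hbv⟩ : ∃ x, v.mem.u16 (rbk + 16 * cv + 2 * pass) = x := ⟨_, rfl⟩
      obtain ⟨tgt, htgt⟩ : ∃ x, v.mem.ptr (g.rb + 8 * j) = x := ⟨_, rfl⟩
      obtain ⟨bg, hbg⟩ : ∃ x, Residue.begin v.mem g.r = x := ⟨_, rfl⟩
      obtain ⟨ps, hps⟩ : ∃ x, Residue.part_size v.mem g.r = x := ⟨_, rfl⟩
      obtain ⟨cbs, hcbs⟩ : ∃ x, stb_vorbis.codebooks v.mem g.f = x := ⟨_, rfl⟩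
      rw [hrowj] at site3 hrowv
      rw [hrp] at site4 site6 hcl
      rw [hcv] at site6 hcl
      rw [hrbk] at site6
      have hpass := hloop.pass_le
      have hiW := hloop.i_lt
      have hR6 := (c.resAt hent).R6
      have hscs := sx_mem cs (by omega)
      have hsi := sx_mem i (by omega)
      have hspass := sx_mem pass (by omega)
      have hcv256 : cv < 256 := by omega
      have hzc : Word.ofBV (BitVec.setWidth 64 (BitVec.zeroExtend 32 (BitVec.setWidth 8 (BitVec.zeroExtend 32
          (BitVec.ofNat 8 cv))))) = UInt64.ofNat cv := zx8 cv hcv256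
      -- where the sites are (off the stack below the frame: the return addresses of the check calls do not meet them)
      have htop : 0x700000 < g.RA - 248 := by omega
      have w2 := site_where hsh hent.offText' htop site2
      have w3 := site_where hsh hent.offText' htop site3
      have w4 := site_where hsh hent.offText' htop site4
      have w6 := site_where hsh hent.offText' htop site6
      have hrbst := hargs.rb_stack
      have hin8 := site8.inside hsh.covers
      have hin10 := site10.inside hsh.covers
      -- the loads, as facts about the loop head's memory
      have l_row : v.mem.readLE (UInt64.ofNat g.TB.base + UInt64.ofNat j <<< 3) 8 = rowj := by
        have e : UInt64.ofNat g.TB.base + UInt64.ofNat j <<< 3 = addr (g.TB.base + 8 * j) := eq_addr _ _ (by u_omega)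
        rw [e]
        exact hrowv
      have l_slot : v.mem.readLE (UInt64.ofNat cs <<< 3 + UInt64.ofNat rowj) 8 = rp := by
        have e : UInt64.ofNat cs <<< 3 + UInt64.ofNat rowj = addr (slot g.TB g.C g.PRD j cs) := by
          apply eq_addr
          rw [slot, hrowj]
          u_omega
        rw [e]
        exact hrp
      have l_c : v.mem.readLE (UInt64.ofNat i + UInt64.ofNat rp) 1 = cv := by
        have e : UInt64.ofNat i + UInt64.ofNat rp = addr (rp + i) := eq_addr _ _ (by u_omega)
        rw [e]
        exact hcv
      have l_rbk : v.mem.readLE (UInt64.ofNat g.r + 24) 8 = rbk := by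
        have e : UInt64.ofNat g.r + 24 = addr (g.r + 24) := eq_addr _ _ (by u_omega)
        rw [e, ← hrbk]
        simp only [vacc, voff]
        rfl
      have l_b : v.mem.readLE (UInt64.ofNat cv <<< 4 + UInt64.ofNat rbk + UInt64.ofNat pass * 2) 2 = bv := by
        have e : UInt64.ofNat cv <<< 4 + UInt64.ofNat rbk + UInt64.ofNat pass * 2 = addr (rbk + 16 * cv + 2 * pass) :=
          eq_addr _ _ (by u_omega)
        rw [e]
        exact hbv
      have l_tgt : v.mem.readLE (UInt64.ofNat j <<< 3 + g.e.reg Reg.rsi) 8 = tgt := by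
        have e : UInt64.ofNat j <<< 3 + g.e.reg Reg.rsi = addr (g.rb + 8 * j) := eq_addr _ _ (by u_omega)
        rw [e]
        exact htgt
      have l_bg : v.mem.readLE (UInt64.ofNat g.r) 4 = bg := by
        rw [← hbg]
        simp only [vacc, voff]
        rfl
      have l_ps : v.mem.readLE (UInt64.ofNat g.r + 8) 4 = ps := by
        have e : UInt64.ofNat g.r + 8 = addr (g.r + 8) := eq_addr _ _ (by u_omega)
        rw [e, ← hps]
        simp only [vacc, voff]
        rfl
      have l_cbs : v.mem.readLE (g.e.reg Reg.rdi + 168) 8 = cbs := by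
        have e : g.e.reg Reg.rdi + 168 = addr (g.f + 168) := eq_addr _ _ (by u_omega)
        rw [e, ← hcbs]
        simp only [vacc, voff]
        rfl
      -- 0x10f93f – 0x10f9b7: `c`, `b = residue_books[c][pass]`, `b >= 0`?
      u_walk hcode [hμ.vendor, hsj, hscs, hsi, hspass, hzc] until [Vorbis.L.decode_residue.cut30, 0x10f9bd] span [Vorbis.L.textLo, Vorbis.L.textHi] side (v_side)
      case check_10f951 =>
        have hun : ShadowUntouched v.mem s_10f951.mem := by v_untouched
        exact Vorbis.Spec.check_site hsh hun site2 (by u_omega)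
      case check_10f967 =>
        have hun : ShadowUntouched v.mem s_10f967.mem := by v_untouched
        exact Vorbis.Spec.check_site hsh hun site3 (by u_omega)
      case check_10f97d =>
        have hun : ShadowUntouched v.mem s_10f97d.mem := by v_untouched
        exact Vorbis.Spec.check_site hsh hun site4 (by u_omega)
      case check_10f98b =>
        have hun : ShadowUntouched v.mem s_10f98b.mem := by v_untouched
        exact Vorbis.Spec.check_site hsh hun site5 (by u_omega)
      case check_10f9a7 =>
        have hun : ShadowUntouched v.mem s_10f9a7.mem := by v_untouched
        exact Vorbis.Spec.check_site hsh hun site6 (by u_omega)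
      · -- the latch: b < 0
        have hs0 : Mem.SameExcept [⟨g.RA - 848, g.RA - 248⟩, ⟨g.RA - 224, g.RA - 216⟩] v.mem s_10f911.mem := by
          u_same
        obtain ⟨hs, hbits, hmu, _⟩ := stack_only hent c hs0 (stb_vorbis.channel_buffers g.e.mem g.f 0) 0
        have hun : ShadowUntouched v.mem s_10f911.mem := by v_untouched
        refine ReachVia.done (Or.inr ?_)
        refine latch_exit hent c hloop hjc hs (win0 hent) hun hbits hmu w_rip ?_ w_rsp ?_ w_eq ?_ w_rbx
        · rw [w_kept .rbp rfl]
          exact r_rbp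
        · rw [w_kept .r15 rfl]
          exact r_r15
        · v_inv
      · -- 0x10f9bd: b ≥ 0: the residue book, fact K
        have hres := c.resAt hent
        have hbv16 : bv < 65536 := by
          rw [← hbv]
          exact X86.User.Mem.u16_lt _ _
        have hbv15 : bv < 32768 := bit15 bv hbv16 hbr_10f9b7
        have hbook : Residue.book v.mem g.r cv pass = (bv : Int) := by
          unfold Residue.book Mem.i16
          rw [hrbk, hbv]
          unfold sint16
          rw [if_pos hbv15]
        have hblt := hres.book_lt hcl (by omega : pass < 8) (by rw [hbook]; omega)
        rw [hbook] at hblt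
        have hs16 := sx16 bv hbv15
        have hK := Residue.factK_buffer hres (rtype := g.rtype) (pc := pcount) hargs.n_le (by rw [c.prd]; exact hloop.lt)
        rw [hbg, hps] at hK
        have hR5 := hres.R5
        rw [hps] at hR5
        have hb1 : bsize g.e.mem g.f 1 ≤ 8192 := by
          have h := hent.vorbis.config.header.HD3.range
          rw [bsize_one]
          omega
        have hcfgv : ConfigOK g.Blk v.mem g.f := (show Real.VorbisOK g.len g.Blk v.mem g.f from c.point.vorbis).config
        have hcbin := hent.pre.env.ok.inside _ hcfgv.cb0.F2
        have hF1 := hcfgv.cb0.F1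
        rw [hcbs] at hcbin
        simp only [voff] at hcbin
        have hs32 := ofBV32_small ps (by omega)
        have hcb64 : cbs + 2120 * bv < 0xC00000 := by omega
        have htgt64 : tgt < 2 ^ 64 := by
          rw [← htgt]
          exact X86.User.Mem.readLE_lt' _ _ 8
        generalize hoffd : bg + pcount * ps = off at hK
        have hoff32 : argU32 (Word.ofBV (BitVec.ofNat 32 bg + BitVec.ofNat 32 pcount * BitVec.ofNat 32 ps)) = off := by
          rw [← hoffd]
          exact off32 bg pcount ps (by omega)
        u_walk hcode [hμ.vendor, hsj, hscs, hsi, hspass, hzc, hs16] until [Vorbis.L.decode_residue.cut30, Vorbis.L.decode_residue.cut32] span [Vorbis.L.textLo, Vorbis.L.textHi] side (v_side)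
        case check_10f9ca =>
          have hun : ShadowUntouched v.mem s_10f9ca.mem := by v_untouched
          exact Vorbis.Spec.check_site hsh hun site7 (by u_omega)
        case check_10f9dd =>
          have hun : ShadowUntouched v.mem s_10f9dd.mem := by v_untouched
          exact Vorbis.Spec.check_site hsh hun site8 (by u_omega)
        case check_10f9e9 =>
          have hun : ShadowUntouched v.mem s_10f9e9.mem := by v_untouched
          exact Vorbis.Spec.check_site hsh hun site9 (by u_omega)
        case check_10fa0d =>
          have hun : ShadowUntouched v.mem s_10fa0d.mem := by v_untouched
          exact Vorbis.Spec.check_site hsh hun site10 (by u_omega)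
        case call_inv => v_inv
        case pre_10fa3f =>
          have hs0 : Mem.SameExcept [⟨g.RA - 848, g.RA - 248⟩, ⟨g.RA - 224, g.RA - 216⟩] v.mem s_10fa3f.mem := by
            u_same
          obtain ⟨_, _, _, hs1⟩ := stack_only hent c hs0 0 0
          have hun : ShadowUntouched v.mem s_10fa3f.mem := by v_untouched
          refine call_pre hent c hs1 hun ?_ ?_ (cv := cv) (pass := pass) (j := j) (pc := pcount) hcl (by omega) (by rw [hbook]; omega) ?_ hjc hnd ?_ hloop.lt ?_ ?_
          · rw [w_rsp]
            u_omega
          · rw [w_rdi]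
            exact erdi
          · rw [w_rsi, hbook, Int.toNat_natCast]
            unfold stb_vorbis.codebooks_at
            rw [hcbs]
            simp only [voff]
            exact rsi_toNat bv cbs hcb64
          · rw [w_rdx, htgt]
            exact toNat_small tgt htgt64
          · rw [w_rcx, hbg, hps, hoffd]
            exact hoff32
          · rw [w_r8, hps]
            exact argU32_small ps (by omega)
        · -- after the return of residue_decode
          v_after_call w_rsp_10fa3f w_mem_10fa3f
          obtain ⟨hpun, hpreader, hpres⟩ := w_post
          have hs0 : Mem.SameExcept [⟨g.RA - 848, g.RA - 248⟩, ⟨g.RA - 224, g.RA - 216⟩] v.mem s_10fa3f.mem := by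
            have w_mem := w_mem_10fa3f
            u_same
          obtain ⟨_, _, hmu0, _⟩ := stack_only hent c hs0 0 0
          have erdi' : (s_10fa3f.reg .rdi).toNat = g.f := by
            rw [w_rdi_10fa3f]
            exact erdi
          rw [erdi'] at hpreader
          have hbits := hpreader.bits
          have hmu : mu s_10fa3fr.mem g.f ≤ mu v.mem g.f := Nat.le_trans hpreader.mu_le hmu0
          have erdx : (s_10fa3f.reg .rdx).toNat = tgt := by
            rw [w_rdx_10fa3f]
            exact toNat_small tgt htgt64
          have ercx : argU32 (s_10fa3f.reg .rcx) = off := by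
            rw [w_rcx_10fa3f]
            exact hoff32
          have er8 : argU32 (s_10fa3f.reg .r8) = ps := by
            rw [w_r8_10fa3f]
            exact argU32_small ps (by omega)
          simp only [erdi', erdx, ercx, er8] at w_same
          -- the window of floats lies in the channel buffer of channel j
          have hnd' : ¬ DND g.e.mem g.dnd j := by
            unfold DND
            rw [← c.dnd_same j hjc, hnd]
            exact fun h => h rfl
          have hwin : ∃ k : Nat, (k : Int) < stb_vorbis.channels g.e.mem g.f ∧
              stb_vorbis.channel_buffers g.e.mem g.f k ≤ tgt + 4 * off ∧
              tgt + 4 * off + 4 * ps ≤ stb_vorbis.channel_buffers g.e.mem g.f k + 4 * bsize g.e.mem g.f 1 := by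
            obtain ⟨k, hk, hptr, _⟩ := hargs.buf j hjc hnd'
            have e : tgt = stb_vorbis.channel_buffers g.e.mem g.f k := by
              rw [← htgt, c.rb_same j hjc, hptr]
            refine ⟨k, hk, ?_, ?_⟩
            · omega
            · omega
          have hsl : Mem.SameExcept [⟨g.RA - 848, g.RA - 248⟩, ⟨g.RA - 224, g.RA - 216⟩, ⟨g.f + 48, g.f + 56⟩,
              ⟨g.f + 84, g.f + 96⟩, ⟨g.f + 136, g.f + 144⟩, ⟨g.f + 1484, g.f + 1749⟩, ⟨g.f + 1752, g.f + 1784⟩,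
              ⟨tgt + 4 * off, tgt + 4 * off + 4 * ps⟩] v.mem s_10fa3fr.mem := by
            u_same
          have hs : Mem.SameExcept (bodySpans g (tgt + 4 * off) (4 * ps)) v.mem s_10fa3fr.mem := hsl
          have hun0 : ShadowUntouched v.mem s_10fa3f.mem := by
            have w_mem := w_mem_10fa3f
            v_untouched
          have hun : ShadowUntouched v.mem s_10fa3fr.mem := Mem.EqOn.trans hun0 hpun
          have l_tap' : s_10fa3fr.mem.readLE (g.e.reg Reg.rsp - 244) 4 = g.tap :=
            (slot_keep hent hs hwin 244 4 (Or.inl ⟨by omega, by omega, by omega⟩)).trans l_tap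
          have htap32 : g.tap < 2 ^ 32 := by
            rw [← l_tap]
            exact X86.User.Mem.readLE_lt' _ _ 4
          obtain ⟨z, w_rax⟩ : ∃ z, s_10fa3fr.reg .rax = z := ⟨_, rfl⟩
          have hbp_r : s_10fa3fr.reg .rbp = g.e.reg .rsp - 8 := by
            rw [w_kept .rbp rfl]
            exact r_rbp
          have h15_r : s_10fa3fr.reg .r15 = UInt64.ofNat g.r := by
            rw [w_kept .r15 rfl]
            exact r_r15
          have hinv_r : abiInv s_10fa3fr := w_inv
          have hsp_r := w_rsp
          have hall := exit_all hent c hloop hs hwin hun hbits hmu hbp_r w_rsp h15_r w_eq hinv_r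
          -- 0x10fa44: `test eax,eax ; jne latch`
          u_walk hcode [hμ.vendor] until [Vorbis.L.decode_residue.cut30, Vorbis.L.decode_residue.cut32] span [Vorbis.L.textLo, Vorbis.L.textHi] side (v_side)
          · -- the latch: residue_decode returned non-zero
            refine ReachVia.done (Or.inr ?_)
            have hs' : Mem.SameExcept (bodySpans g (tgt + 4 * off) (4 * ps)) v.mem s_10f911.mem := by
              rw [w_mem]
              exact hs
            refine latch_exit hent c hloop hjc hs' hwin ?_ ?_ ?_ w_rip ?_ w_rsp ?_ w_eq ?_ w_rbx
            · rw [w_mem]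
              exact hun
            · rw [w_mem]
              exact hbits
            · rw [w_mem]
              exact hmu
            · rw [w_kept .rbp rfl]
              exact r_rbp
            · rw [w_kept .r15 rfl]
              exact r_r15
            · v_inv
          · -- 0x10fa53 `done:`: residue_decode returned 0, r15d = temp_alloc_point
            refine ReachVia.done (Or.inl (Or.inr ⟨w_rip, ?_, ?_⟩))
            · refine common_same_mem hall.1 w_mem ?_ ?_ ?_
              · rw [hbp_r, w_kept .rbp rfl]
                exact r_rbp
              · rw [w_rsp, hsp_r]
              · v_inv
            · rw [w_r15]
              exact ofBV32_small g.tap htap32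

end Vorbis.Spec.decode_residue_10

/-- Segment 10 of `decode_residue` (the j-loop 2279 with the `residue_decode` call): `ReachVia.loop` over the body. -/
theorem Vorbis.Spec.Worked.decode_residue_10_ok : Vorbis.Spec.decode_residue_10.Statement := by
  unfold Vorbis.Spec.decode_residue_10.Statement
  intro Lay hLay μ hμ u₀ hcode h1 h8 h2 h4 hrd
  exact Vorbis.Spec.decode_residue_10.seg10_of_body
    (fun g hent pass cs i pcount v hat =>
      Vorbis.Spec.decode_residue_10.loop_body hLay hμ hcode h1 h8 h2 h4 hrd g hent pass cs i pcount v hat)
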